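-- pv_equiv track=rewrite | github.com/szarkamarci/modularai | models/statistical/main.py | find_path_to_desktop
-- ===== SOURCE A (Python) =====
-- def find_path_to_desktop(path):
--     path_elements = path.split('\\')
--     res_path = ''
--
--     for element in path_elements:
--
--         res_path += element + '/'
--         if element == 'Desktop':
--             return res_path
--
--     return res_path
-- ===== SOURCE B (Python) =====
-- def find_path_to_desktop(path):
--     elements = path.split('\\')
--     try:
--         i = elements.index('Desktop')
--     except ValueError:
--         return '/'.join(elements) + '/'
--     return '/'.join(elements[:i + 1]) + '/'
-- ===== Notes on version B (the rewrite author's own statement) =====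
-- stated objective: simpler
-- what changed: Replaces the accumulating early-return loop with a locate-then-construct decomposition: find the index of 'Desktop' once, slice the element list up to it, and build the result with a single '/'.join.
import Mathlib
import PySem

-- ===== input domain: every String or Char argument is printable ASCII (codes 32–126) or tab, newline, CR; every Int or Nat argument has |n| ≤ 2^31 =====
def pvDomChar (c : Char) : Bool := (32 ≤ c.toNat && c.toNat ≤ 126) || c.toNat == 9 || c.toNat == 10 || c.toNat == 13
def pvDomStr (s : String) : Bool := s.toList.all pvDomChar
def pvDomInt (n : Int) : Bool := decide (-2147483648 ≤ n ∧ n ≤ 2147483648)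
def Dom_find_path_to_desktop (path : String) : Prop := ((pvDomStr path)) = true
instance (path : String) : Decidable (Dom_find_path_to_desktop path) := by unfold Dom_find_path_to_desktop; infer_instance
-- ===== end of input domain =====

-- B replaces A's accumulating early-return loop by locate-then-construct: find 'Desktop' once,
-- slice the element list up to it, and build the result with a single join (objective: simpler).

-- ===== PORT A =====
-- the 'Desktop' marker, as code points
def pvDesktop : List Char := "Desktop".toList

-- A's for-loop: accumulate element + '/', early-return at 'Desktop' (on code points)
def pvLoopA : List (List Char) → List Char → List Char
  | [], res => res
  | e :: rest, res =>
    let r := res ++ e ++ ['/']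
    if e = pvDesktop then r else pvLoopA rest r

def find_path_to_desktop (path : String) : String :=
  String.ofList (pvLoopA (PySem.Chars.splitOn path.toList ['\\']) [])

-- ===== PORT B =====
def find_path_to_desktop_alt (path : String) : String :=
  let elements := PySem.Chars.splitOn path.toList ['\\']
  match PySem.List.index? elements pvDesktop with
  | none => String.ofList (PySem.Chars.join ['/'] elements ++ ['/'])
  | some i => String.ofList (PySem.Chars.join ['/'] (elements.take (i + 1)) ++ ['/'])

-- ===== PRECONDITION & SPEC =====
def Spec_find_path_to_desktop (path : String) (out : String) : Prop := out = find_path_to_desktop_alt path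
instance (path : String) (out : String) : Decidable (Spec_find_path_to_desktop path out) := by unfold Spec_find_path_to_desktop; infer_instance

-- ===== CLAIM (what is proved, stated in full; the proofs are below) =====
def Claim_equal_find_path_to_desktop : Prop := ∀ (path : String), Dom_find_path_to_desktop path → Spec_find_path_to_desktop path (find_path_to_desktop path)

-- ===== LEMMAS AND PROOFS =====

-- splitOn's worker never returns the empty list
theorem pv_go_ne_nil (sep : List Char) : ∀ (fuel : Nat) (l cur : List Char) (acc : List (List Char)),
    PySem.Chars.splitOn.go sep fuel l cur acc ≠ [] := by
  intro fuel
  induction fuel with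
  | zero => intro l cur acc; simp [PySem.Chars.splitOn.go]
  | succ n ih =>
    intro l cur acc
    cases l with
    | nil => simp [PySem.Chars.splitOn.go]
    | cons c rest =>
      rw [PySem.Chars.splitOn.go]
      split
      · exact ih _ _ _
      · exact ih _ _ _

theorem pv_splitOn_ne_nil (s sep : List Char) : PySem.Chars.splitOn s sep ≠ [] := by
  unfold PySem.Chars.splitOn
  exact pv_go_ne_nil _ _ _ _ _

-- A's loop on a NONEMPTY element list equals B's locate-then-construct value
theorem pv_loop_eq : ∀ (rest : List (List Char)) (e res : List Char),
    pvLoopA (e :: rest) res =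
      res ++ (match PySem.List.index? (e :: rest) pvDesktop with
              | none => PySem.Chars.join ['/'] (e :: rest)
              | some i => PySem.Chars.join ['/'] ((e :: rest).take (i + 1))) ++ ['/'] := by
  intro rest
  induction rest with
  | nil =>
    intro e res
    by_cases he : e = pvDesktop
    · subst he
      rw [PySem.List.index?_cons_self]
      simp [pvLoopA, PySem.Chars.join_singleton]
    · rw [PySem.List.index?_cons_of_ne _ he]
      simp [pvLoopA, he, PySem.Chars.join_singleton, PySem.List.index?]
  | cons f rest' ih =>
    intro e res
    by_cases he : e = pvDesktop
    · subst he
      rw [PySem.List.index?_cons_self]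
      simp [pvLoopA, PySem.Chars.join_singleton]
    · rw [PySem.List.index?_cons_of_ne _ he]
      have hl : pvLoopA (e :: f :: rest') res = pvLoopA (f :: rest') (res ++ e ++ ['/']) := by
        simp [pvLoopA, he]
      rw [hl, ih f (res ++ e ++ ['/'])]
      cases h : PySem.List.index? (f :: rest') pvDesktop with
      | none =>
        simp [PySem.Chars.join_cons_cons]
      | some i =>
        simp only [Option.map_some]
        rw [show (f :: rest').take (i + 1) = f :: rest'.take i from List.take_succ_cons ..]
        rw [show (e :: f :: rest').take (i + 1 + 1) = e :: f :: rest'.take i from by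
          simp [List.take_succ_cons]]
        simp [PySem.Chars.join_cons_cons]

-- ===== VERDICT (by name: the statement is the Claim_ definition above) =====
theorem find_path_to_desktop_spec : Claim_equal_find_path_to_desktop := by
  intro path _
  unfold Spec_find_path_to_desktop find_path_to_desktop find_path_to_desktop_alt
  cases h : PySem.Chars.splitOn path.toList ['\\'] with
  | nil => exact absurd h (pv_splitOn_ne_nil _ _)
  | cons e rest =>
    rw [pv_loop_eq rest e [], PySem.List.index?_eq_idxOf?]
    cases h2 : List.idxOf? pvDesktop (e :: rest) <;> simp [h2]
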